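-- pv_equiv track=rewrite | github.com/ologin/PIE-V | src/piev/error_simulator.py | enforce_max_consecutive
-- ===== SOURCE A (Python) =====
-- from typing import Any, Dict, List, Optional, Sequence, Tuple, Set
--
-- def enforce_max_consecutive(selected_indices: List[int], max_consecutive: int) -> bool:
--     if not selected_indices:
--         return True
--     s = sorted(selected_indices)
--     run = 1
--     for i in range(1, len(s)):
--         if s[i] == s[i - 1] + 1:
--             run += 1
--             if run > int(max_consecutive):
--                 return False
--         else:
--             run = 1
--     return True
-- ===== SOURCE B (Python) =====
-- def enforce_max_consecutive(selected_indices, max_consecutive):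
--     if not selected_indices:
--         return True
--     s = sorted(selected_indices)
--     n = len(s)
--     keys = [v - i for i, v in enumerate(s)]
--     cuts = [0] + [i for i, (p, q) in enumerate(zip(keys, keys[1:]), 1) if p != q] + [n]
--     longest = max(b - a for a, b in zip(cuts, cuts[1:]))
--     return longest <= max(int(max_consecutive), 1)
-- ===== Notes on version B (the rewrite author's own statement) =====
-- stated objective: alternative
-- what changed: A counts runs with a stateful counter and an early return; B maps the sorted list to value-minus-index keys, collects the boundary indices where the key changes, and compares the largest gap between consecutive boundaries against max(max_consecutive, 1).
import Mathlib
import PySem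

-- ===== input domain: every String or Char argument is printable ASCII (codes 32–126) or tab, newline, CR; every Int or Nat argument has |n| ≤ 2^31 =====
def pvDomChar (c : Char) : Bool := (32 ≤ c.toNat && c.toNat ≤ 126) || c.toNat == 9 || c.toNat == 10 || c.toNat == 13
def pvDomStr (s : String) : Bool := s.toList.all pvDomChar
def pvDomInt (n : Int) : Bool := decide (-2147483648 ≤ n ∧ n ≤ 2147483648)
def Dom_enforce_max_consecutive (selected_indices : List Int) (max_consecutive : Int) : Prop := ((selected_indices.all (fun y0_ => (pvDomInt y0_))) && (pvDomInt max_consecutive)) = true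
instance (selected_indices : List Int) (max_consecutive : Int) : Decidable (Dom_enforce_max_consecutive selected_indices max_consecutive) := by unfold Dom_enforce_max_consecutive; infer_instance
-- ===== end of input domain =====

-- B replaces A's early-exit run counter by a boundary-index/gap formulation (alternative decomposition, same cost).

-- ===== PORT A =====
-- A's for-loop over range(1, len(s)) compares s[i] with s[i-1]; ported as the same
-- left-to-right traversal carrying (previous element, run counter), with the early return.
def emcLoop (M : Int) : Int → List Int → Int → Bool
  | _, [], _ => true
  | prev, x :: xs, run =>
    if x = prev + 1 then
      (if run + 1 > M then false else emcLoop M x xs (run + 1))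
    else emcLoop M x xs 1

def enforce_max_consecutive (selected_indices : List Int) (max_consecutive : Int) : Bool :=
  match selected_indices with
  | [] => true
  | _ =>
    match PySem.List.sorted selected_indices (fun x => x) false with
    | [] => true
    | h :: t => emcLoop max_consecutive h t 1

-- ===== PORT B =====
def enforce_max_consecutive_alt (selected_indices : List Int) (max_consecutive : Int) : Bool :=
  if selected_indices = [] then true
  else
    let s := PySem.List.sorted selected_indices (fun x => x) false
    let n : Int := s.length
    let keys := s.zipIdx.map (fun vi => vi.1 - (vi.2 : Int))
    let cuts : List Int :=
      0 :: (((keys.zip keys.tail).zipIdx 1).filterMap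
        (fun x => if x.1.1 ≠ x.1.2 then some ((x.2 : Int)) else none)) ++ [n]
    let diffs := (cuts.zip cuts.tail).map (fun ab => ab.2 - ab.1)
    let longest := match diffs with
      | d :: ds => ds.foldl max d
      | [] => 0
    decide (longest ≤ max max_consecutive 1)

-- ===== PRECONDITION & SPEC =====
def Spec_enforce_max_consecutive (selected_indices : List Int) (max_consecutive : Int) (out : Bool) : Prop := out = enforce_max_consecutive_alt selected_indices max_consecutive
instance (selected_indices : List Int) (max_consecutive : Int) (out : Bool) : Decidable (Spec_enforce_max_consecutive selected_indices max_consecutive out) := by unfold Spec_enforce_max_consecutive; infer_instance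

-- ===== CLAIM (what is proved, stated in full; the proofs are below) =====
def Claim_equal_enforce_max_consecutive : Prop := ∀ (selected_indices : List Int) (max_consecutive : Int), Dom_enforce_max_consecutive selected_indices max_consecutive → Spec_enforce_max_consecutive selected_indices max_consecutive (enforce_max_consecutive selected_indices max_consecutive)

-- ===== LEMMAS AND PROOFS =====

-- adjacency booleans of the sorted list: b_i = (s_{i+1} = s_i + 1)
def emcBools (s : List Int) : List Bool := (s.zip s.tail).map (fun ab => decide (ab.2 = ab.1 + 1))

-- A's loop abstracted to the adjacency booleans
def emcGo (M : Int) : List Bool → Int → Bool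
  | [], _ => true
  | true :: t, r => if r + 1 > M then false else emcGo M t (r + 1)
  | false :: t, _ => emcGo M t 1

-- running maximum of the run counter
def emcBmax : List Bool → Int → Int
  | [], r => r
  | b :: t, r => max r (emcBmax t (if b then r + 1 else 1))

-- run lengths, left to right
def emcRl : Int → List Bool → List Int
  | r, [] => [r]
  | r, true :: t => emcRl (r + 1) t
  | r, false :: t => r :: emcRl 1 t

-- positions (from k) of the false bits
def emcMids : List Bool → Int → List Int
  | [], _ => []
  | b :: t, k => if b then emcMids t (k + 1) else k :: emcMids t (k + 1)

def emcGaps (l : List Int) : List Int := (l.zip l.tail).map (fun ab => ab.2 - ab.1)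

theorem emcBools_cons (a b : Int) (l : List Int) :
    emcBools (a :: b :: l) = decide (b = a + 1) :: emcBools (b :: l) := rfl

theorem emcGaps_cons2 (x y : Int) (l : List Int) :
    emcGaps (x :: y :: l) = (y - x) :: emcGaps (y :: l) := rfl

theorem emcLoop_eq_go (M : Int) (rest : List Int) : ∀ (prev run : Int),
    emcLoop M prev rest run = emcGo M (emcBools (prev :: rest)) run := by
  induction rest with
  | nil => intro prev run; rfl
  | cons x xs ih =>
    intro prev run
    rw [emcBools_cons]
    simp only [emcLoop]
    by_cases h : x = prev + 1
    · subst h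
      rw [if_pos rfl, show decide (prev + 1 = prev + 1) = true from by simp]
      simp only [emcGo]
      split_ifs with h2
      · rfl
      · exact ih (prev + 1) (run + 1)
    · rw [if_neg h, show decide (x = prev + 1) = false from decide_eq_false h]
      simp only [emcGo]
      exact ih x 1

theorem emcBmax_ge (t : List Bool) (x : Int) : x ≤ emcBmax t x := by
  cases t <;> simp [emcBmax]

theorem emcGo_eq (M : Int) (bs : List Bool) : ∀ r : Int, 1 ≤ r → r ≤ max M 1 →
    emcGo M bs r = decide (emcBmax bs r ≤ max M 1) := by
  induction bs with
  | nil =>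
    intro r h1 h2
    simp only [emcGo, emcBmax]
    symm
    exact decide_eq_true h2
  | cons b t ih =>
    intro r h1 h2
    cases b with
    | true =>
      have hge := emcBmax_ge t (r + 1)
      by_cases h : r + 1 > M
      · have : ¬ (emcBmax (true :: t) r ≤ max M 1) := by
          rw [show emcBmax (true :: t) r = max r (emcBmax t (r + 1)) from by simp [emcBmax]]
          omega
        simp only [emcGo, if_pos h]
        symm
        exact decide_eq_false this
      · have heq : emcBmax (true :: t) r = emcBmax t (r + 1) := by
          rw [show emcBmax (true :: t) r = max r (emcBmax t (r + 1)) from by simp [emcBmax]]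
          omega
        rw [show emcGo M (true :: t) r = emcGo M t (r + 1) from by simp [emcGo, h],
            ih (r + 1) (by omega) (by omega), heq]
    | false =>
      rw [show emcGo M (false :: t) r = emcGo M t 1 from by simp [emcGo],
          ih 1 le_rfl (by omega)]
      rw [show emcBmax (false :: t) r = max r (emcBmax t 1) from by simp [emcBmax]]
      rw [decide_eq_decide]
      constructor
      · intro hle
        omega
      · intro hle
        omega

theorem foldl_max_cons (l : List Int) : ∀ a b : Int, l.foldl max (max a b) = max a (l.foldl max b) := by
  induction l with
  | nil => intro a b; simp
  | cons x xs ih =>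
    intro a b
    simp only [List.foldl]
    rw [max_assoc]
    exact ih a (max b x)

def emcMaxList : List Int → Int
  | [] => 0
  | d :: ds => ds.foldl max d

theorem emcRl_ne_nil (bs : List Bool) : ∀ r : Int, emcRl r bs ≠ [] := by
  induction bs with
  | nil => intro r; simp [emcRl]
  | cons b t ih =>
    intro r
    cases b
    · simp [emcRl]
    · exact ih (r + 1)

theorem emcMaxList_rl (bs : List Bool) : ∀ r : Int, emcMaxList (emcRl r bs) = emcBmax bs r := by
  induction bs with
  | nil => intro r; simp [emcRl, emcMaxList, emcBmax]
  | cons b t ih =>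
    intro r
    cases b with
    | true =>
      have hge := emcBmax_ge t (r + 1)
      rw [show emcRl r (true :: t) = emcRl (r + 1) t from rfl, ih (r + 1)]
      rw [show emcBmax (true :: t) r = max r (emcBmax t (r + 1)) from by simp [emcBmax]]
      omega
    | false =>
      rw [show emcRl r (false :: t) = r :: emcRl 1 t from rfl]
      rw [show emcBmax (false :: t) r = max r (emcBmax t 1) from by simp [emcBmax]]
      cases hE : emcRl 1 t with
      | nil => exact absurd hE (emcRl_ne_nil t 1)
      | cons d ds =>
        have hml := ih 1
        rw [hE] at hml
        simp only [emcMaxList] at hml ⊢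
        rw [show List.foldl max r (d :: ds) = List.foldl max (max r d) ds from rfl,
            foldl_max_cons, hml]

theorem emcGaps_mids (bs : List Bool) : ∀ (r a : Int),
    emcGaps (a :: emcMids bs (a + r) ++ [a + r + bs.length]) = emcRl r bs := by
  induction bs with
  | nil => intro r a; simp [emcMids, emcGaps, emcRl]
  | cons b t ih =>
    intro r a
    cases b with
    | true =>
      rw [show emcMids (true :: t) (a + r) = emcMids t (a + r + 1) from by simp [emcMids]]
      rw [show emcRl r (true :: t) = emcRl (r + 1) t from rfl]
      have e1 : a + r + ((true :: t).length : Int) = a + (r + 1) + t.length := by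
        simp; ring
      have e2 : a + r + 1 = a + (r + 1) := by ring
      rw [e1, e2]
      exact ih (r + 1) a
    | false =>
      rw [show emcMids (false :: t) (a + r) = (a + r) :: emcMids t (a + r + 1) from by simp [emcMids]]
      rw [show emcRl r (false :: t) = r :: emcRl 1 t from rfl]
      have e1 : a + r + ((false :: t).length : Int) = (a + r) + 1 + t.length := by
        simp; ring
      rw [e1]
      rw [show (a :: ((a + r) :: emcMids t (a + r + 1)) ++ [a + r + 1 + (t.length : Int)]) =
          a :: (a + r) :: (emcMids t (a + r + 1) ++ [a + r + 1 + (t.length : Int)]) from rfl]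
      rw [emcGaps_cons2]
      have e3 : a + r - a = r := by ring
      rw [e3]
      congr 1
      have := ih 1 (a + r)
      rw [show a + r + 1 = a + r + 1 from rfl] at this
      simpa using this

-- the port's filterMap expression equals emcMids on the equality booleans
theorem emcFilterMap_eq (l : List (Int × Int)) : ∀ k : Nat,
    ((l.zipIdx k).filterMap (fun x => if x.1.1 ≠ x.1.2 then some ((x.2 : Int)) else none)) =
      emcMids (l.map (fun pq => decide (pq.1 = pq.2))) k := by
  induction l with
  | nil => intro k; simp [emcMids]
  | cons p t ih =>
    intro k
    have hrec := ih (k + 1)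
    push_cast at hrec
    simp only [ne_eq, ite_not] at hrec
    by_cases h : p.1 = p.2 <;>
      simp [List.zipIdx_cons, emcMids, h, hrec]

-- key pairs compare equal exactly where the sorted list steps by one
theorem emcKeys_bools (s : List Int) : ∀ j : Nat,
    (((s.zipIdx j).map (fun vi => vi.1 - (vi.2 : Int))).zip
      ((s.zipIdx j).map (fun vi => vi.1 - (vi.2 : Int))).tail).map (fun pq => decide (pq.1 = pq.2)) =
      emcBools s := by
  induction s with
  | nil => intro j; simp [emcBools]
  | cons x xs ih =>
    intro j
    cases xs with
    | nil => simp [emcBools]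
    | cons y ys =>
      have h := ih (j + 1)
      rw [emcBools_cons]
      simp only [List.zipIdx_cons, List.map_cons, List.tail_cons, List.zip_cons_cons] at h ⊢
      push_cast at h ⊢
      refine List.cons_eq_cons.mpr ⟨?_, ?_⟩
      · simp only [decide_eq_decide]
        omega
      · exact h

theorem emc_main (xs : List Int) (M : Int) :
    enforce_max_consecutive xs M = enforce_max_consecutive_alt xs M := by
  cases xs with
  | nil => simp [enforce_max_consecutive, enforce_max_consecutive_alt]
  | cons x0 rest =>
    unfold enforce_max_consecutive enforce_max_consecutive_alt
    cases hs : PySem.List.sorted (x0 :: rest) (fun x => x) false with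
    | nil =>
      exact absurd (PySem.List.sorted_perm (xs := x0 :: rest) (key := fun x => x) (rev := false))
        (by rw [hs]; simp)
    | cons h t =>
      simp only [reduceCtorEq, if_neg, not_false_iff]
      rw [emcLoop_eq_go]
      rw [emcGo_eq M (emcBools (h :: t)) 1 le_rfl (by omega)]
      set bs := emcBools (h :: t) with hbs
      have hfm : List.filterMap (fun x => if x.1.1 ≠ x.1.2 then some ((x.2 : Int)) else none)
          (((List.map (fun vi => vi.1 - (vi.2 : Int)) (h :: t).zipIdx).zip
            (List.map (fun vi => vi.1 - (vi.2 : Int)) (h :: t).zipIdx).tail).zipIdx 1) =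
          emcMids bs (0 + 1) := by
        rw [emcFilterMap_eq]
        rw [show (((1 : Nat) : Int)) = (0 + 1 : Int) from by norm_num]
        congr 1
        exact emcKeys_bools (h :: t) 0
      have hlen : (((h :: t).length : Nat) : Int) = 0 + 1 + (bs.length : Int) := by
        have hb : bs.length = t.length := by
          simp [hbs, emcBools]
        rw [hb]
        simp only [List.length_cons]
        push_cast
        ring
      rw [hfm, hlen]
      have e : List.map (fun ab : Int × Int => ab.2 - ab.1)
          ((0 :: emcMids bs (0 + 1) ++ [0 + 1 + (bs.length : Int)]).zip
            (0 :: emcMids bs (0 + 1) ++ [0 + 1 + (bs.length : Int)]).tail)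
          = emcRl 1 bs := emcGaps_mids bs 1 0
      rw [e]
      cases hE : emcRl 1 bs with
      | nil => exact absurd hE (emcRl_ne_nil bs 1)
      | cons d ds =>
        have hml := emcMaxList_rl bs 1
        rw [hE] at hml
        simp only [emcMaxList] at hml
        show decide (emcBmax bs 1 ≤ max M 1) = decide (List.foldl max d ds ≤ max M 1)
        rw [hml]

-- ===== VERDICT (by name: the statement is the Claim_ definition above) =====
theorem enforce_max_consecutive_spec : Claim_equal_enforce_max_consecutive := by
  intro xs M _
  unfold Spec_enforce_max_consecutive
  exact emc_main xs M
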